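-- pv_equiv track=rewrite | github.com/nickhamlin/aidsight | app/graph_data.py | get_best_label
-- ===== SOURCE A (Python) =====
-- def resembles_label(label):
--     for i, ch in enumerate(label):
--         if ch.isdigit():
--             return False
--
--     return True
--
-- def get_best_label(labels):
--     best_label = None
--
--     for label in labels:
--         if not resembles_label(label):
--             continue
--
--         if label.find('(') != -1:
--             if best_label is None or best_label.find('(') == -1 or len(label) > len(best_label):
--                 best_label = label
--
--         elif best_label is None or best_label.find('(') == -1:
--             best_label = label
--
--     return best_label
-- ===== SOURCE B (Python) =====
-- def get_best_label(labels):
--     valid = [l for l in labels if not any(c.isdigit() for c in l)]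
--     parens = [l for l in valid if '(' in l]
--     if parens:
--         return max(parens, key=len)
--     return valid[-1] if valid else None
-- ===== Notes on version B (the rewrite author's own statement) =====
-- stated objective: simpler
-- what changed: Replaced the stateful fold with branch-laden update rules by a declarative three-liner: filter out digit-containing labels, then return the first-longest parenthesized one via max(key=len), else the last remaining label.
import Mathlib
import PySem

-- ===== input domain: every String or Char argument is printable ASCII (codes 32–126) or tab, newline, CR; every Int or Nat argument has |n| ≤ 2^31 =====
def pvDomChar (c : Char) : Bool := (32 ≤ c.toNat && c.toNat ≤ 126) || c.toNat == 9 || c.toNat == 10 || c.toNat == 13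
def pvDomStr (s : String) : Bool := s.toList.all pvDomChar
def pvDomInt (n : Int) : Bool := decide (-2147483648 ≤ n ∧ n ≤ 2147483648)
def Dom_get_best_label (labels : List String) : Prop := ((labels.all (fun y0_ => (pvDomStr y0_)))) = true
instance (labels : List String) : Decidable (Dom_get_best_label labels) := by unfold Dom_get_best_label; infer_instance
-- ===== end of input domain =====

-- B replaces A's stateful fold by filter + max(key=len) / last; objective: simpler.

-- ===== PORT A =====
-- early-return loop over the characters of `label`
def resembles_label_go (cs : List Char) : Bool :=
  match cs with
  | [] => true
  | ch :: rest => if PySem.Chars.isdigit ch then false else resembles_label_go rest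

def resembles_label (label : String) : Bool :=
  resembles_label_go label.toList

def get_best_label (labels : List String) : Option String :=
  labels.foldl (fun best_label label =>
    if !(resembles_label label) then best_label
    else if PySem.Str.find label "(" ≠ -1 then
      match best_label with
      | none => some label
      | some b =>
        if PySem.Str.find b "(" = -1 ∨ PySem.Str.len label > PySem.Str.len b then
          some label
        else some b
    else
      match best_label with
      | none => some label
      | some b => if PySem.Str.find b "(" = -1 then some label else some b) none

-- ===== PORT B =====
def get_best_label_alt (labels : List String) : Option String :=
  let valid := labels.filter (fun l => !(l.toList.any PySem.Chars.isdigit))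
  let parens := valid.filter (fun l => PySem.Str.isIn "(" l)
  if parens ≠ [] then PySem.List.max? parens (fun l => PySem.Str.len l)
  else valid.getLast?

-- ===== PRECONDITION & SPEC =====
def Spec_get_best_label (labels : List String) (out : Option String) : Prop := out = get_best_label_alt labels
instance (labels : List String) (out : Option String) : Decidable (Spec_get_best_label labels out) := by unfold Spec_get_best_label; infer_instance

-- ===== CLAIM (what is proved, stated in full; the proofs are below) =====
def Claim_equal_get_best_label : Prop := ∀ (labels : List String), Dom_get_best_label labels → Spec_get_best_label labels (get_best_label labels)

-- ===== LEMMAS AND PROOFS =====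

-- A's loop body, named for the proofs
def pvStep (best_label : Option String) (label : String) : Option String :=
  if !(resembles_label label) then best_label
  else if PySem.Str.find label "(" ≠ -1 then
    match best_label with
    | none => some label
    | some b =>
      if PySem.Str.find b "(" = -1 ∨ PySem.Str.len label > PySem.Str.len b then
        some label
      else some b
  else
    match best_label with
    | none => some label
    | some b => if PySem.Str.find b "(" = -1 then some label else some b

-- B's combination step applied to an arbitrary list of (digit-free) candidates
def pvKeep (vs : List String) : Option String :=
  let parens := vs.filter (fun l => PySem.Str.isIn "(" l)
  if parens ≠ [] then PySem.List.max? parens (fun l => PySem.Str.len l)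
  else vs.getLast?

lemma resembles_eq_not_any (l : String) :
    resembles_label l = !(l.toList.any PySem.Chars.isdigit) := by
  show resembles_label_go l.toList = _
  induction l.toList with
  | nil => rfl
  | cons c cs ih =>
      simp [resembles_label_go, List.any_cons]
      by_cases h : PySem.Chars.isdigit c <;> simp [h, ih]

lemma find_ne_iff_isIn (l : String) :
    (PySem.Str.find l "(" ≠ -1) ↔ PySem.Str.isIn "(" l = true := by
  rw [PySem.Str.find_ne_neg_one_iff, PySem.Str.isIn_iff_infix]

lemma keep_paren_head (x : String) (vs : List String) (hx : PySem.Str.isIn "(" x = true) :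
    pvKeep (x :: vs)
      = PySem.List.max? (x :: vs.filter (fun l => PySem.Str.isIn "(" l)) (fun l => PySem.Str.len l) := by
  simp only [pvKeep, List.filter_cons, hx, if_true]
  rw [if_pos (List.cons_ne_nil _ _)]

lemma keep_nonparen_head (x : String) (vs : List String) (hx : PySem.Str.isIn "(" x = false) :
    pvKeep (x :: vs)
      = if vs.filter (fun l => PySem.Str.isIn "(" l) ≠ [] then
          PySem.List.max? (vs.filter (fun l => PySem.Str.isIn "(" l)) (fun l => PySem.Str.len l)
        else (x :: vs).getLast? := by
  simp only [pvKeep, List.filter_cons, hx, Bool.false_eq_true, if_false]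

lemma max?_len_cons_cons (b l : String) (ps : List String) :
    PySem.List.max? (b :: l :: ps) (fun s => PySem.Str.len s)
      = PySem.List.max? ((if PySem.Str.len b < PySem.Str.len l then l else b) :: ps)
          (fun s => PySem.Str.len s) := by
  by_cases h : b.length < l.length <;>
    simp [PySem.List.max?, PySem.Str.len, h]

lemma step_pp (b l : String) (hr : resembles_label l = true)
    (hb : PySem.Str.isIn "(" b = true) (hl : PySem.Str.isIn "(" l = true) :
    pvStep (some b) l = if PySem.Str.len b < PySem.Str.len l then some l else some b := by
  have hfl : PySem.Str.find l "(" ≠ -1 := (find_ne_iff_isIn l).mpr hl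
  have hfb : PySem.Str.find b "(" ≠ -1 := (find_ne_iff_isIn b).mpr hb
  unfold pvStep
  rw [hr]
  simp only [Bool.not_true, Bool.false_eq_true, if_false]
  rw [if_pos hfl]
  show (if PySem.Str.find b "(" = -1 ∨ PySem.Str.len l > PySem.Str.len b then some l else some b) = _
  by_cases hlen : PySem.Str.len b < PySem.Str.len l
  · rw [if_pos (Or.inr hlen), if_pos hlen]
  · rw [if_neg (fun h => h.elim hfb hlen), if_neg hlen]

lemma step_pn (b l : String) (hr : resembles_label l = true)
    (hb : PySem.Str.isIn "(" b = true) (hl : PySem.Str.isIn "(" l = false) :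
    pvStep (some b) l = some b := by
  have hfl : PySem.Str.find l "(" = -1 := by
    by_contra h; rw [(find_ne_iff_isIn l).mp h] at hl; exact absurd hl (by decide)
  have hfb : PySem.Str.find b "(" ≠ -1 := (find_ne_iff_isIn b).mpr hb
  unfold pvStep
  rw [hr]
  simp only [Bool.not_true, Bool.false_eq_true, if_false]
  rw [if_neg (fun h => h hfl)]
  show (if PySem.Str.find b "(" = -1 then some l else some b) = _
  rw [if_neg hfb]

lemma step_np (b l : String) (hr : resembles_label l = true)
    (hb : PySem.Str.isIn "(" b = false) (hl : PySem.Str.isIn "(" l = true) :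
    pvStep (some b) l = some l := by
  have hfl : PySem.Str.find l "(" ≠ -1 := (find_ne_iff_isIn l).mpr hl
  have hfb : PySem.Str.find b "(" = -1 := by
    by_contra h; rw [(find_ne_iff_isIn b).mp h] at hb; exact absurd hb (by decide)
  unfold pvStep
  rw [hr]
  simp only [Bool.not_true, Bool.false_eq_true, if_false]
  rw [if_pos hfl]
  show (if PySem.Str.find b "(" = -1 ∨ PySem.Str.len l > PySem.Str.len b then some l else some b) = _
  rw [if_pos (Or.inl hfb)]

lemma step_nn (b l : String) (hr : resembles_label l = true)
    (hb : PySem.Str.isIn "(" b = false) (hl : PySem.Str.isIn "(" l = false) :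
    pvStep (some b) l = some l := by
  have hfl : PySem.Str.find l "(" = -1 := by
    by_contra h; rw [(find_ne_iff_isIn l).mp h] at hl; exact absurd hl (by decide)
  have hfb : PySem.Str.find b "(" = -1 := by
    by_contra h; rw [(find_ne_iff_isIn b).mp h] at hb; exact absurd hb (by decide)
  unfold pvStep
  rw [hr]
  simp only [Bool.not_true, Bool.false_eq_true, if_false]
  rw [if_neg (fun h => h hfl)]
  show (if PySem.Str.find b "(" = -1 then some l else some b) = _
  rw [if_pos hfb]

lemma keep_two (b l : String) (fs : List String) (hr : resembles_label l = true) :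
    pvKeep (b :: l :: fs) = pvKeep ((pvStep (some b) l).toList ++ fs) := by
  by_cases hb : PySem.Str.isIn "(" b = true <;> by_cases hl : PySem.Str.isIn "(" l = true
  · -- both parenthesized: strictly-longer-wins
    rw [step_pp b l hr hb hl]
    by_cases hlen : PySem.Str.len b < PySem.Str.len l
    · rw [if_pos hlen, Option.toList_some, List.singleton_append,
        keep_paren_head b _ hb, List.filter_cons_of_pos hl, max?_len_cons_cons, if_pos hlen,
        keep_paren_head l _ hl]
    · rw [if_neg hlen, Option.toList_some, List.singleton_append,
        keep_paren_head b _ hb, List.filter_cons_of_pos hl, max?_len_cons_cons, if_neg hlen,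
        keep_paren_head b _ hb]
  · -- b parenthesized, l not: best stays b
    have hl' : PySem.Str.isIn "(" l = false := by simpa using hl
    rw [step_pn b l hr hb hl', Option.toList_some, List.singleton_append,
      keep_paren_head b _ hb, keep_paren_head b _ hb, List.filter_cons_of_neg (by simpa using hl')]
  · -- l parenthesized, b not: l wins
    have hb' : PySem.Str.isIn "(" b = false := by simpa using hb
    rw [step_np b l hr hb' hl, Option.toList_some, List.singleton_append,
      keep_nonparen_head b _ hb', List.filter_cons_of_pos hl,
      if_pos (List.cons_ne_nil _ _), keep_paren_head l _ hl]
  · -- neither parenthesized: the later label wins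
    have hb' : PySem.Str.isIn "(" b = false := by simpa using hb
    have hl' : PySem.Str.isIn "(" l = false := by simpa using hl
    rw [step_nn b l hr hb' hl', Option.toList_some, List.singleton_append,
      keep_nonparen_head b _ hb', keep_nonparen_head l _ hl',
      List.filter_cons_of_neg (by simpa using hl')]
    by_cases hfs : fs.filter (fun l => PySem.Str.isIn "(" l) = []
    · rw [if_neg (by simpa using hfs), if_neg (by simpa using hfs), List.getLast?_cons_cons]
    · rw [if_pos hfs, if_pos hfs]

lemma step_none (l : String) (hr : resembles_label l = true) :
    pvStep none l = some l := by
  unfold pvStep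
  rw [hr]
  simp only [Bool.not_true, Bool.false_eq_true, if_false]
  by_cases h : PySem.Str.find l "(" ≠ -1
  · rw [if_pos h]
  · rw [if_neg h]

lemma foldl_eq_keep (ls : List String) (acc : Option String) :
    List.foldl pvStep acc ls
      = pvKeep (acc.toList ++ ls.filter (fun l => !(l.toList.any PySem.Chars.isdigit))) := by
  induction ls generalizing acc with
  | nil =>
      match acc with
      | none => rfl
      | some b =>
          by_cases hb : PySem.Str.isIn "(" b = true
          · rw [List.filter_nil, Option.toList_some, List.append_nil,
              keep_paren_head b [] hb, List.filter_nil]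
            simp [PySem.List.max?]
          · have hb' : PySem.Str.isIn "(" b = false := by simpa using hb
            rw [List.filter_nil, Option.toList_some, List.append_nil,
              keep_nonparen_head b [] hb', List.filter_nil]
            simp
  | cons l ls ih =>
      rw [List.foldl_cons, ih]
      by_cases hv : (!(l.toList.any PySem.Chars.isdigit)) = true
      · have hr : resembles_label l = true := by rw [resembles_eq_not_any]; exact hv
        rw [List.filter_cons_of_pos (p := fun s : String => !s.toList.any PySem.Chars.isdigit) hv]
        match acc with
        | none =>
            rw [step_none l hr]; rfl
        | some b =>
            exact (keep_two b l _ hr).symm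
      · have hr : resembles_label l = false := by
          rw [resembles_eq_not_any]; simpa using hv
        have hstep : pvStep acc l = acc := by simp [pvStep, hr]
        rw [hstep, List.filter_cons_of_neg (p := fun s : String => !s.toList.any PySem.Chars.isdigit) (by simpa using hv)]

-- ===== VERDICT (by name: the statement is the Claim_ definition above) =====
theorem get_best_label_spec : Claim_equal_get_best_label := by
  intro labels _
  show get_best_label labels = get_best_label_alt labels
  have h : get_best_label labels = List.foldl pvStep none labels := rfl
  rw [h, foldl_eq_keep]
  rfl
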